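-- pv_equiv track=rewrite | github.com/conda-tools/conda-execute | conda_execute/cli.py | extract_env_spec
-- ===== SOURCE A (Python) =====
-- def extract_env_spec(handle):
--     spec = []
--     in_spec = False
--     for line in handle:
--         if in_spec is True:
--             # FIXME: we are pretty fragile with whitespace at this point.
--             if line.startswith('#  - '):
--                 spec.append(line[5:].strip())
--             elif not line.startswith('# '):
--                 # We're done with the spec.
--                 break
--
--         elif line.strip() == '# conda execute env:':
--             in_spec = True
--     return spec
-- ===== SOURCE B (Python) =====
-- def extract_env_spec(handle):
--     lines = list(handle)
--     for i, line in enumerate(lines):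
--         if line.strip() == '# conda execute env:':
--             body = lines[i + 1:]
--             end = next((j for j, l in enumerate(body) if not l.startswith('# ')), len(body))
--             return [l[5:].strip() for l in body[:end] if l.startswith('#  - ')]
--     return []
-- ===== Notes on version B (the rewrite author's own statement) =====
-- stated objective: idiomatic
-- what changed: Replaces the boolean in_spec flag and accumulator loop with a two-phase decomposition: locate the marker line, cut the comment block at the first non-'# ' line, and build the result with a single comprehension.
import Mathlib
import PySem

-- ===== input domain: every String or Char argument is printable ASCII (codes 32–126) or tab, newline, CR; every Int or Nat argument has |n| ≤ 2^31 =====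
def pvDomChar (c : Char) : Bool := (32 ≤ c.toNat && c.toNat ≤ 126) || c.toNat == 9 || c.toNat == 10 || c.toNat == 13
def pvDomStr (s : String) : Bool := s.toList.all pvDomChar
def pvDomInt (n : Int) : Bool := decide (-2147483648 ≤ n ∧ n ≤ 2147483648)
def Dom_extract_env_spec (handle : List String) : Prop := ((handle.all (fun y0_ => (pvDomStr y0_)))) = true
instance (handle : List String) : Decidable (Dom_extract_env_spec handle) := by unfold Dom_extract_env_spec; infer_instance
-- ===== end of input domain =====

-- B replaces A's boolean-flag accumulator loop by a two-phase decomposition (find marker, cut block, comprehension); objective: idiomatic.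


-- ===== PORT A =====
-- the for-loop with its `spec` accumulator, `in_spec` flag and early `break`
def aLoop : List String → List String → Bool → List String
  | [], spec, _ => spec
  | line :: rest, spec, inSpec =>
    if inSpec = true then
      if PySem.Str.startswith line "#  - " then
        aLoop rest (spec ++ [PySem.Str.strip (PySem.Str.slice line (some 5) none)]) inSpec
      else if PySem.Str.startswith line "# " = false then spec
      else aLoop rest spec inSpec
    else if PySem.Str.strip line = "# conda execute env:" then aLoop rest spec true
    else aLoop rest spec inSpec

def extract_env_spec (handle : List String) : List String := aLoop handle [] false

-- ===== PORT B =====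
-- phase 1: the lines after the marker line (none if no marker)
def altFind : List String → Option (List String)
  | [] => none
  | line :: rest =>
    if PySem.Str.strip line = "# conda execute env:" then some rest else altFind rest

-- index of the first line not starting with '# ' (= length if none)
def altEnd : List String → Nat
  | [] => 0
  | l :: rest => if PySem.Str.startswith l "# " = false then 0 else altEnd rest + 1

def extract_env_spec_alt (handle : List String) : List String :=
  match altFind handle with
  | none => []
  | some body =>
    (body.take (altEnd body)).filterMap (fun l =>
      if PySem.Str.startswith l "#  - " then
        some (PySem.Str.strip (PySem.Str.slice l (some 5) none))
      else none)

-- ===== PRECONDITION & SPEC =====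
def Spec_extract_env_spec (handle : List String) (out : List String) : Prop := out = extract_env_spec_alt handle
instance (handle : List String) (out : List String) : Decidable (Spec_extract_env_spec handle out) := by unfold Spec_extract_env_spec; infer_instance

-- ===== CLAIM (what is proved, stated in full; the proofs are below) =====
def Claim_equal_extract_env_spec : Prop := ∀ (handle : List String), Dom_extract_env_spec handle → Spec_extract_env_spec handle (extract_env_spec handle)

-- ===== LEMMAS AND PROOFS =====

lemma sw_hash_of_item (l : List Char) (h : PySem.Chars.startswith l ['#', ' ', ' ', '-', ' '] = true) :
    PySem.Chars.startswith l ['#', ' '] = true := by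
  rw [PySem.Chars.startswith_iff] at h ⊢
  exact List.IsPrefix.trans (by decide) h

def itemF (l : String) : Option String :=
  if PySem.Str.startswith l "#  - " then
    some (PySem.Str.strip (PySem.Str.slice l (some 5) none))
  else none

lemma aLoop_true (body : List String) : ∀ spec,
    aLoop body spec true = spec ++ (body.take (altEnd body)).filterMap itemF := by
  induction body with
  | nil => intro spec; simp [aLoop, altEnd]
  | cons l rest ih =>
    intro spec
    by_cases h5 : PySem.Chars.startswith l.toList ['#', ' ', ' ', '-', ' '] = true
    · have h2 := sw_hash_of_item l.toList h5
      simp [aLoop, altEnd, h5, h2, ih, itemF]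
    · by_cases h2 : PySem.Chars.startswith l.toList ['#', ' '] = true
      · simp [aLoop, altEnd, h5, h2, ih, itemF]
      · simp [aLoop, altEnd, h5, h2]

lemma aLoop_false (handle : List String) :
    aLoop handle [] false = extract_env_spec_alt handle := by
  induction handle with
  | nil => simp [aLoop, extract_env_spec_alt, altFind]
  | cons l rest ih =>
    by_cases hm : PySem.Str.strip l = "# conda execute env:"
    · simp [aLoop, hm, extract_env_spec_alt, altFind, aLoop_true, itemF]
    · simpa [aLoop, hm, extract_env_spec_alt, altFind] using ih

-- ===== VERDICT (by name: the statement is the Claim_ definition above) =====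
theorem extract_env_spec_spec : Claim_equal_extract_env_spec := by
  intro handle _
  unfold Spec_extract_env_spec extract_env_spec
  exact aLoop_false handle
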